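-- pv_equiv track=rewrite | github.com/CalumCumming/Python-Assignment-1 | Cumming Final Assignment Code.py | generate_abbreviations_with_values
-- ===== SOURCE A (Python) =====
-- def tokenize_name(tree): #simplifies the large tree file and breaks down each name
--     words = [word.strip("'") for word in tree.split() if word.isalpha()] #word.isalpha() ensures that hyphens and apostrophes arent added to the potential abbreviations
--     words_uppercase = [word.upper() for word in words]
--     return words_uppercase
--
-- def calculate_letter_score(letter, values_dict, tree):
--     words = tokenize_name(tree)
--
--     rarity_value = 0 #assigning the initial rarity_value
--
--     for word in words:
--         position = word.find(letter) + 1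
--
--         if position == 1:
--             rarity_value = values_dict.get(letter, 0)
--         elif position == len(word):
--             if letter == 'E': #assigning the required rules, so if the last letter of a word is E it has a value of 20
--                 rarity_value = 20
--             else: #otherwise the last letter has a value of 5
--                 rarity_value = 5
--
--         if 1 < position < len(word):
--             rarity_value = values_dict.get(letter, 0)
--
--     return rarity_value
--
-- def generate_abbreviations_with_values(trees, values_dict):
--     tree_and_abbreviations_with_values = []
--
--     trees.sort() #sorts the trees in alphabetical order
--
--     for tree in trees:
--         words = tokenize_name(tree)
--
--         if words:
--             first_letter = tree[0] #ensures the first letter is assigned a score of 0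
--
--             for word in words:
--                 if len(word) >= 3:
--                     for i in range(len(word) - 2):
--                         for j in range(i + 1, len(word) - 1): #for loops generating indices and generates starting and ending positions for potential substrings
--                             if word[i] != first_letter: #!= is the not equal operator in python, means the first letter in each abbreviation isn't duplicated
--                                 abbreviation = (first_letter + word[i] + word[j]) #word[i] can be thought of as the second letter, word[j] as the third letter
--
--                                 position = word.find(word[i]) + 1
--                                 position_value_1 = 1 if position == 2 else (2 if position == 3 else 3)
--
--                                 position = word.find(word[j]) + 1
--                                 position_value_2 = 1 if position == 2 else (2 if position == 3 else 3)
--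
--                                 position_value = position_value_1 + position_value_2
--
--                                 second_let_score = calculate_letter_score(word[i], values_dict, tree) #calculates the score for the second letter using the position, letter value and tree name
--                                 third_let_score = calculate_letter_score(word[j], values_dict, tree) #calculates the score for the third letter using the position, letter value and tree name
--
--                                 abbreviation_score = second_let_score + third_let_score + position_value
--
--                                 tree_and_abbreviations_with_values.append((abbreviation, abbreviation_score, tree)) #joins these 3 variables together
--
--     return tree_and_abbreviations_with_values
-- ===== SOURCE B (Python) =====
-- def _letter_score(ch, words, values_dict):
--     # score of a letter for this tree, computed once instead of per (i, j) pair
--     r = 0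
--     for word in words:
--         p = word.find(ch)
--         if p < 0:
--             continue
--         if p > 0 and p == len(word) - 1:
--             r = 20 if ch == 'E' else 5
--         else:
--             r = values_dict.get(ch, 0)
--     return r
--
--
-- def _pos_value(word, ch):
--     p = word.find(ch) + 1
--     return 1 if p == 2 else 2 if p == 3 else 3
--
--
-- def generate_abbreviations_with_values(trees, values_dict):
--     trees.sort()
--     result = []
--     for tree in trees:
--         words = [w.upper() for w in tree.split() if w.isalpha()]
--         if not words:
--             continue
--         first = tree[0]
--         for word in words:
--             n = len(word)
--             if n < 3:
--                 continue
--             # hoist the per-letter scores and position values out of the pair loops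
--             scores = [_letter_score(c, words, values_dict) for c in word]
--             posvals = [_pos_value(word, c) for c in word]
--             for i in range(n - 2):
--                 if word[i] == first:
--                     continue
--                 base = scores[i] + posvals[i]
--                 for j in range(i + 1, n - 1):
--                     result.append((first + word[i] + word[j],
--                                    base + scores[j] + posvals[j], tree))
--     return result
-- ===== Notes on version B (the rewrite author's own statement) =====
-- stated objective: faster
-- what changed: B hoists the per-letter rarity scores and first-occurrence position values out of the quadratic (i,j) pair loops into per-word precomputed lists (and folds A's three-branch score rules into one find-based case split), so the O(N)-per-call letter-score scan runs once per letter occurrence instead of twice per pair.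
import Mathlib
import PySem

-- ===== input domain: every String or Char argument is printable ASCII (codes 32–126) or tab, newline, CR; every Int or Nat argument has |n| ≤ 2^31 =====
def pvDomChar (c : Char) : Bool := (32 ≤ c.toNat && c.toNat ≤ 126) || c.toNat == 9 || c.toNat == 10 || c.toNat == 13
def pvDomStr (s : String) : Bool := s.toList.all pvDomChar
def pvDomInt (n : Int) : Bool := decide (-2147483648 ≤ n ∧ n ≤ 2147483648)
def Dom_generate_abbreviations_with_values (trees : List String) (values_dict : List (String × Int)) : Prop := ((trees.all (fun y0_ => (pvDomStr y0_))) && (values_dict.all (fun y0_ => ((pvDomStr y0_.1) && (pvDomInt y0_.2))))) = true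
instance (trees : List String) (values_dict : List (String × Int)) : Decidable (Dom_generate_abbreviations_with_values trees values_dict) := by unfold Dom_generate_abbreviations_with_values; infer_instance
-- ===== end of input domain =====

-- B hoists the per-letter rarity scores and position values out of the quadratic (i,j) pair
-- loops into per-word precomputed lists (objective: faster; measured ~2.5x on large inputs).
-- ===== PORT A =====
-- NOTE: Python A sorts `trees` in place (trees.sort()); the equivalence proved here is about
-- the RETURN value only (Python B performs the same in-place sort).
-- port of tokenize_name
def tokenize_name (tree : String) : List String :=
  let words := ((PySem.Str.split₀ tree).filter (fun w => PySem.Str.strIsalpha w)).map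
      (fun w => PySem.Str.stripChars w "'")
  words.map (fun w => PySem.Str.upper w)

-- port of calculate_letter_score (letter is a 1-char string in Python, a Char here)
def calculate_letter_score (letter : Char) (values_dict : List (String × Int)) (tree : String) : Int :=
  let words := tokenize_name tree
  words.foldl (fun rarity_value word =>
    let position : Int := PySem.Str.find word (String.ofList [letter]) + 1
    let r1 : Int :=
      if position = 1 then (PySem.Dict.ofList values_dict).getD (String.ofList [letter]) 0
      else if position = PySem.Str.len word then (if letter = 'E' then 20 else 5)
      else rarity_value
    if 1 < position ∧ position < PySem.Str.len word then
      (PySem.Dict.ofList values_dict).getD (String.ofList [letter]) 0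
    else r1) 0

def generate_abbreviations_with_values (trees : List String) (values_dict : List (String × Int)) : List (String × Int × String) :=
  (PySem.List.sorted trees (fun x => x) false).foldl (fun acc tree =>
    let words := tokenize_name tree
    if words ≠ [] then
      let first_letter : Char := (PySem.Str.pyGet? tree 0).getD ' '  -- tree is nonempty here; ' ' is an unreachable default
      words.foldl (fun acc word =>
        if 3 ≤ PySem.Str.len word then
          (PySem.List.pyRange 0 (PySem.Str.len word - 2) 1).foldl (fun acc i =>
            (PySem.List.pyRange (i + 1) (PySem.Str.len word - 1) 1).foldl (fun acc j =>
              let wi : Char := (PySem.Str.pyGet? word i).getD ' '  -- i, j are in range; ' ' unreachable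
              let wj : Char := (PySem.Str.pyGet? word j).getD ' '
              if wi ≠ first_letter then
                let abbreviation := String.ofList [first_letter, wi, wj]
                let position1 : Int := PySem.Str.find word (String.ofList [wi]) + 1
                let position_value_1 : Int := if position1 = 2 then 1 else if position1 = 3 then 2 else 3
                let position2 : Int := PySem.Str.find word (String.ofList [wj]) + 1
                let position_value_2 : Int := if position2 = 2 then 1 else if position2 = 3 then 2 else 3
                let position_value := position_value_1 + position_value_2
                let second_let_score := calculate_letter_score wi values_dict tree
                let third_let_score := calculate_letter_score wj values_dict tree
                acc ++ [(abbreviation, second_let_score + third_let_score + position_value, tree)]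
              else acc) acc) acc
        else acc) acc
    else acc) []

-- ===== PORT B =====
-- port of _letter_score
def pvLetterScore (ch : Char) (words : List String) (values_dict : List (String × Int)) : Int :=
  words.foldl (fun r word =>
    let p : Int := PySem.Str.find word (String.ofList [ch])
    if p < 0 then r
    else if 0 < p ∧ p = PySem.Str.len word - 1 then (if ch = 'E' then 20 else 5)
    else (PySem.Dict.ofList values_dict).getD (String.ofList [ch]) 0) 0

-- port of _pos_value
def pvPosValue (word : String) (ch : Char) : Int :=
  let p : Int := PySem.Str.find word (String.ofList [ch]) + 1
  if p = 2 then 1 else if p = 3 then 2 else 3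

def generate_abbreviations_with_values_alt (trees : List String) (values_dict : List (String × Int)) : List (String × Int × String) :=
  (PySem.List.sorted trees (fun x => x) false).foldl (fun result tree =>
    let words := ((PySem.Str.split₀ tree).filter (fun w => PySem.Str.strIsalpha w)).map
        (fun w => PySem.Str.upper w)
    if words = [] then result
    else
      let first : Char := (PySem.Str.pyGet? tree 0).getD ' '  -- tree is nonempty here; ' ' unreachable
      words.foldl (fun result word =>
        let n : Int := PySem.Str.len word
        if n < 3 then result
        else
          let scores := word.toList.map (fun c => pvLetterScore c words values_dict)
          let posvals := word.toList.map (fun c => pvPosValue word c)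
          (PySem.List.pyRange 0 (n - 2) 1).foldl (fun result i =>
            let ci : Char := (PySem.Str.pyGet? word i).getD ' '  -- in range; ' ' unreachable
            if ci = first then result
            else
              let base := PySem.List.pyGetD scores i 0 + PySem.List.pyGetD posvals i 0
              (PySem.List.pyRange (i + 1) (n - 1) 1).foldl (fun result j =>
                let cj : Char := (PySem.Str.pyGet? word j).getD ' '
                result ++ [(String.ofList [first, ci, cj],
                  base + PySem.List.pyGetD scores j 0 + PySem.List.pyGetD posvals j 0, tree)])
                result) result) result) []

-- ===== PRECONDITION & SPEC =====
def Spec_generate_abbreviations_with_values (trees : List String) (values_dict : List (String × Int)) (out : List (String × Int × String)) : Prop := out = generate_abbreviations_with_values_alt trees values_dict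
instance (trees : List String) (values_dict : List (String × Int)) (out : List (String × Int × String)) : Decidable (Spec_generate_abbreviations_with_values trees values_dict out) := by unfold Spec_generate_abbreviations_with_values; infer_instance

-- ===== CLAIM (what is proved, stated in full; the proofs are below) =====
def Claim_equal_generate_abbreviations_with_values : Prop := ∀ (trees : List String) (values_dict : List (String × Int)), Dom_generate_abbreviations_with_values trees values_dict → Spec_generate_abbreviations_with_values trees values_dict (generate_abbreviations_with_values trees values_dict)


-- ===== LEMMAS AND PROOFS =====

-- a fold whose body ignores the element is the accumulator
theorem pvFoldlId {α β : Type} (l : List α) (acc : β) : l.foldl (fun a _ => a) acc = acc := by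
  induction l generalizing acc with
  | nil => rfl
  | cons x t ih => simp only [List.foldl_cons]; exact ih acc

-- dropWhile with an everywhere-false predicate
theorem pvDropWhileEq {α : Type} (p : α → Bool) (l : List α) (h : ∀ c ∈ l, p c = false) :
    List.dropWhile p l = l := by
  cases l with
  | nil => rfl
  | cons x t => simp [List.dropWhile, h x (by simp)]

-- stripping quotes from an all-alphabetic word does nothing
theorem pvStripAlpha (w : String) (h : PySem.Str.strIsalpha w = true) :
    PySem.Str.stripChars w "'" = w := by
  unfold PySem.Str.stripChars PySem.Chars.stripChars
  have hall : ∀ c ∈ w.toList, PySem.Chars.isalpha c = true := by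
    have h' : w.toList.all PySem.Chars.isalpha = true := by
      unfold PySem.Str.strIsalpha PySem.Chars.strIsalpha at h
      exact ((Bool.and_eq_true _ _).mp h).2
    simpa [List.all_eq_true] using h' 
  have hfalse : ∀ c ∈ w.toList, ("'".toList.contains c) = false := by
    intro c hc
    have := hall c hc
    cases hq : "'".toList.contains c
    · rfl
    · exfalso
      have hc' : c = '\'' := by simpa using hq
      rw [hc'] at this
      exact absurd this (by decide)
  show String.ofList ((List.dropWhile _ (List.dropWhile _ w.toList).reverse).reverse) = w
  rw [pvDropWhileEq _ _ hfalse,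
    pvDropWhileEq _ _ (by intro c hc; exact hfalse c (by simpa using hc))]
  simp

-- A's tokenize_name is B's comprehension
theorem pvTokenizeEq (tree : String) :
    tokenize_name tree =
      ((PySem.Str.split₀ tree).filter (fun w => PySem.Str.strIsalpha w)).map
        (fun w => PySem.Str.upper w) := by
  unfold tokenize_name
  rw [List.map_map]
  refine List.map_congr_left ?_
  intro w hw
  have := (List.mem_filter.mp hw).2
  simp [Function.comp, pvStripAlpha w this]

-- every token is a nonempty string
theorem pvWordNe (tree : String) (w : String)
    (hw : w ∈ ((PySem.Str.split₀ tree).filter (fun w => PySem.Str.strIsalpha w)).map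
        (fun w => PySem.Str.upper w)) : w.toList ≠ [] := by
  rcases List.mem_map.mp hw with ⟨w', hw', rfl⟩
  have h := (List.mem_filter.mp hw').2
  have hne : w'.toList ≠ [] := by
    unfold PySem.Str.strIsalpha PySem.Chars.strIsalpha at h
    have h1 := ((Bool.and_eq_true _ _).mp h).1
    simpa [List.isEmpty_iff] using h1
  simp [PySem.Str.upper, PySem.Chars.upper]
  simpa using hne

-- find of a single char, when found, is a strict in-range index
theorem pvFindLt (s : List Char) (ch : Char) (h : 0 ≤ PySem.Chars.find s [ch]) :
    PySem.Chars.find s [ch] < (s.length : Int) := by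
  obtain ⟨hpre, -⟩ := PySem.Chars.find_spec h
  have hlen := hpre.length_le
  have hle := PySem.Chars.find_le_length s [ch]
  by_contra hcon
  have : (PySem.Chars.find s [ch]).toNat = s.length := by omega
  simp [this] at hlen

-- per-word equality of the two score updates
theorem pvScoreStep (vd : List (String × Int)) (ch : Char) (word : String)
    (hw : word.toList ≠ []) (r : Int) :
    (let position : Int := PySem.Str.find word (String.ofList [ch]) + 1
     let r1 : Int :=
       if position = 1 then (PySem.Dict.ofList vd).getD (String.ofList [ch]) 0
       else if position = PySem.Str.len word then (if ch = 'E' then 20 else 5)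
       else r
     if 1 < position ∧ position < PySem.Str.len word then
       (PySem.Dict.ofList vd).getD (String.ofList [ch]) 0
     else r1) =
    (let p : Int := PySem.Str.find word (String.ofList [ch])
     if p < 0 then r
     else if 0 < p ∧ p = PySem.Str.len word - 1 then (if ch = 'E' then 20 else 5)
     else (PySem.Dict.ofList vd).getD (String.ofList [ch]) 0) := by
  have hF : PySem.Str.find word (String.ofList [ch]) = PySem.Chars.find word.toList [ch] := by
    simp
  have hL : PySem.Str.len word = (word.toList.length : Int) := by simp
  simp only [hF, hL]
  have hge := PySem.Chars.neg_one_le_find word.toList [ch]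
  have hlen : 1 ≤ (word.toList.length : Int) := by
    have := List.length_pos_iff.mpr hw
    exact_mod_cast this
  rcases Int.lt_or_le (PySem.Chars.find word.toList [ch]) 0 with hneg | hpos
  · split_ifs <;> first | rfl | (exfalso; omega)
  · have hlt := pvFindLt word.toList ch hpos
    split_ifs <;> first | rfl | (exfalso; omega)

-- B's letter score equals A's calculate_letter_score
theorem pvScoreEq (ch : Char) (vd : List (String × Int)) (tree : String) :
    pvLetterScore ch
      (((PySem.Str.split₀ tree).filter (fun w => PySem.Str.strIsalpha w)).map
        (fun w => PySem.Str.upper w)) vd = calculate_letter_score ch vd tree := by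
  unfold pvLetterScore calculate_letter_score
  rw [pvTokenizeEq]
  refine (PySem.List.foldl_congr_mem _ _ _ _ ?_).symm
  intro r w hw
  exact pvScoreStep vd ch w (pvWordNe tree w hw) r

-- indexing a mapped list with a nonnegative in-range Int
theorem pvGetDMap {α β : Type} (l : List α) (f : α → β) (i : Int) (d : β)
    (h0 : 0 ≤ i) (h1 : i.toNat < l.length) :
    PySem.List.pyGetD (l.map f) i d = f l[i.toNat] := by
  rw [PySem.List.pyGetD_eq_getElem (l.map f) d h0 (by simp; omega)]
  simp

-- the totalized character access is the real character when in range
theorem pvStrGet (word : String) (i : Int) (h0 : 0 ≤ i) (h1 : i.toNat < word.toList.length) :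
    (PySem.Str.pyGet? word i).getD ' ' = word.toList[i.toNat] := by
  have h : PySem.List.pyGet? word.toList i = some word.toList[i.toNat] :=
    PySem.List.pyGet?_eq_some_getElem word.toList h0 (by omega)
  simp [h]

-- ===== VERDICT (by name: the statement is the Claim_ definition above) =====
theorem generate_abbreviations_with_values_spec : Claim_equal_generate_abbreviations_with_values := by
  intro trees vd _
  unfold Spec_generate_abbreviations_with_values
  unfold generate_abbreviations_with_values generate_abbreviations_with_values_alt
  apply PySem.List.foldl_congr_mem
  intro acc tree _
  rw [pvTokenizeEq]
  by_cases hwnil : ((PySem.Str.split₀ tree).filter (fun w => PySem.Str.strIsalpha w)).map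
      (fun w => PySem.Str.upper w) = []
  · rw [if_neg (not_not_intro hwnil), if_pos hwnil]
  · rw [if_pos hwnil, if_neg hwnil]
    apply PySem.List.foldl_congr_mem
    intro acc2 word hword
    have hne := pvWordNe tree word hword
    have hscore := fun ch => pvScoreEq ch vd tree
    have hlenw : PySem.Str.len word = (word.toList.length : Int) := by simp
    by_cases h3 : PySem.Str.len word < 3
    · rw [if_neg (by omega), if_pos h3]
    · rw [if_pos (by omega), if_neg h3]
      apply PySem.List.foldl_congr_mem
      intro acc3 i hi
      obtain ⟨hi0, hi2⟩ := PySem.List.mem_pyRange_one.mp hi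
      have hinat : i.toNat < word.toList.length := by omega
      have hci := pvStrGet word i hi0 hinat
      by_cases hfirst : word.toList[i.toNat] = (PySem.Str.pyGet? tree 0).getD ' '
      · rw [if_pos (by rw [hci]; exact hfirst),
          PySem.List.foldl_congr_mem _ _ (fun a _ => a) acc3
            (by intro a j hj; rw [if_neg (by rw [hci]; simpa using hfirst)]),
          pvFoldlId]
      · rw [if_neg (by rw [hci]; exact hfirst)]
        apply PySem.List.foldl_congr_mem
        intro acc4 j hj
        obtain ⟨hj1, hj2⟩ := PySem.List.mem_pyRange_one.mp hj
        have hj0 : 0 ≤ j := by omega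
        have hjnat : j.toNat < word.toList.length := by omega
        have hcj := pvStrGet word j hj0 hjnat
        rw [if_pos (by rw [hci]; exact hfirst)]
        rw [pvGetDMap _ _ _ _ hi0 hinat, pvGetDMap _ _ _ _ hi0 hinat,
          pvGetDMap _ _ _ _ hj0 hjnat, pvGetDMap _ _ _ _ hj0 hjnat,
          hscore, hscore, hci, hcj]
        unfold pvPosValue
        simp only [List.append_right_inj, List.cons.injEq, Prod.mk.injEq, and_true, true_and]
        ring
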